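-- pv_equiv track=rewrite | github.com/nathanfdunn/thismagiccarddoesnotexist | mtg_design_api.py | get_color_ident
-- ===== SOURCE A (Python) =====
-- def get_color_ident(mana_cost):
--     ret = 'C'
--     for color in 'UWGRB':
--         if color.lower() in mana_cost.lower():
--             if ret != 'C':
--                 ret = 'Gld'
--             else:
--                 ret = color
--     return ret, ret
-- ===== SOURCE B (Python) =====
-- def get_color_ident(mana_cost):
--     present = {ch for ch in mana_cost.lower() if ch in 'uwgrb'}
--     if not present:
--         ret = 'C'
--     elif len(present) == 1:
--         (ret,) = present
--         ret = ret.upper()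
--     else:
--         ret = 'Gld'
--     return ret, ret
-- ===== Notes on version B (the rewrite author's own statement) =====
-- stated objective: alternative
-- what changed: Instead of A's scan over the color constant 'UWGRB' with a substring test and a collapsing accumulator per color, B makes one pass over the input string's characters, collecting the color letters that occur into a set, and classifies by the set's size (empty -> 'C', singleton -> that letter uppercased, larger -> 'Gld').
import Mathlib
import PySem

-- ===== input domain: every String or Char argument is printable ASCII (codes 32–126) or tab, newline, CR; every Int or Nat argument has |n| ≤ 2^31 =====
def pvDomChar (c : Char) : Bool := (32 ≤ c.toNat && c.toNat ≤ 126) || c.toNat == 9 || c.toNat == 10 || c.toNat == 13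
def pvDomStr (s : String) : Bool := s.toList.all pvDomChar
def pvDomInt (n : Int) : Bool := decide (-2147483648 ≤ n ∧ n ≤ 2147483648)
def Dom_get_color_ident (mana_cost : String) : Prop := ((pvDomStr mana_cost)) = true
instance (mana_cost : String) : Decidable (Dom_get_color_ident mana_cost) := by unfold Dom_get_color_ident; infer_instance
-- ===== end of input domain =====

-- B scans the input's characters once, collecting the color letters present into a set,
-- and classifies by the set's size, instead of A's scan over 'UWGRB' with substring tests
-- and a collapsing accumulator; objective: alternative decomposition, same cost.

-- ===== PORT A =====
def get_color_ident (mana_cost : String) : String × String :=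
  let ret := "UWGRB".toList.foldl (fun ret color =>
    if PySem.Str.isIn (PySem.Str.lower (String.ofList [color])) (PySem.Str.lower mana_cost) then
      if ret ≠ "C" then "Gld" else String.ofList [color]
    else ret) "C"
  (ret, ret)

-- ===== PORT B =====
def get_color_ident_alt (mana_cost : String) : String × String :=
  -- set comprehension over the lowercased string's characters
  let present : PySem.Set Char :=
    PySem.Set.ofList ((PySem.Chars.lower mana_cost.toList).filter
      (fun ch => PySem.Chars.isIn [ch] "uwgrb".toList))
  let ret := match present with
    | [] => "C"
    | [c] => String.ofList (PySem.Chars.upper [c])  -- singleton unpack, then .upper()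
    | _ => "Gld"
  (ret, ret)

-- ===== PRECONDITION & SPEC =====
def Spec_get_color_ident (mana_cost : String) (out : String × String) : Prop := out = get_color_ident_alt mana_cost
instance (mana_cost : String) (out : String × String) : Decidable (Spec_get_color_ident mana_cost out) := by unfold Spec_get_color_ident; infer_instance

-- ===== CLAIM (what is proved, stated in full; the proofs are below) =====
def Claim_equal_get_color_ident : Prop := ∀ (mana_cost : String), Dom_get_color_ident mana_cost → Spec_get_color_ident mana_cost (get_color_ident mana_cost)

-- ===== LEMMAS AND PROOFS =====

-- 'c in s' for a single char is list membership
theorem isIn_singleton_iff (c : Char) (s : List Char) :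
    PySem.Chars.isIn [c] s = true ↔ c ∈ s := by
  rw [PySem.Chars.isIn_iff_infix]
  constructor
  · intro h; exact h.sublist.subset (by simp)
  · intro h
    obtain ⟨l, r, rfl⟩ := List.append_of_mem h
    exact ⟨l, r, by simp⟩

-- the classification step of B, as a function of the element list
def classify (l : List Char) : String :=
  match l with
  | [] => "C"
  | [c] => String.ofList (PySem.Chars.upper [c])
  | _ => "Gld"

theorem classify_perm {l m : List Char} (h : l.Perm m) : classify l = classify m := by
  have hlen := h.length_eq
  rcases l with _ | ⟨a, _ | ⟨b, t⟩⟩ <;> rcases m with _ | ⟨a', _ | ⟨b', t'⟩⟩ <;>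
    simp at hlen <;>
    first
      | rfl
      | (rw [List.perm_singleton.mp h])

-- ===== VERDICT (by name: the statement is the Claim_ definition above) =====
theorem get_color_ident_spec : Claim_equal_get_color_ident := by
  intro mana_cost _
  unfold Spec_get_color_ident
  set L := PySem.Chars.lower mana_cost.toList with hL
  have hperm : (PySem.Set.ofList (L.filter (fun ch => PySem.Chars.isIn [ch] "uwgrb".toList))).Perm
      (("uwgrb".toList).filter (fun c => PySem.Chars.isIn [c] L)) := by
    apply (List.perm_ext_iff_of_nodup (PySem.Set.nodup_ofList _) ?_).mpr
    · intro x
      simp only [PySem.Set.mem_ofList, List.mem_filter, isIn_singleton_iff]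
      exact and_comm
    · exact List.Nodup.filter _ (by decide)
  rw [show get_color_ident_alt mana_cost =
      (classify (PySem.Set.ofList (L.filter (fun ch => PySem.Chars.isIn [ch] "uwgrb".toList))),
       classify (PySem.Set.ofList (L.filter (fun ch => PySem.Chars.isIn [ch] "uwgrb".toList)))) from rfl,
    classify_perm hperm]
  by_cases hU : PySem.Chars.isIn ['u'] L = true <;>
  by_cases hW : PySem.Chars.isIn ['w'] L = true <;>
  by_cases hG : PySem.Chars.isIn ['g'] L = true <;>
  by_cases hR : PySem.Chars.isIn ['r'] L = true <;>
  by_cases hB : PySem.Chars.isIn ['b'] L = true <;>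
  (have e : ∀ c : Char, PySem.Str.isIn (PySem.Str.lower (String.ofList [c])) (PySem.Str.lower mana_cost)
        = PySem.Chars.isIn (PySem.Chars.lower [c]) L := by intro c; rw [hL]; simp
   simp only [get_color_ident, show "UWGRB".toList = ['U','W','G','R','B'] from rfl,
      List.foldl, e,
      show PySem.Chars.lower ['U'] = ['u'] from by decide,
      show PySem.Chars.lower ['W'] = ['w'] from by decide,
      show PySem.Chars.lower ['G'] = ['g'] from by decide,
      show PySem.Chars.lower ['R'] = ['r'] from by decide,
      show PySem.Chars.lower ['B'] = ['b'] from by decide,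
      hU, hW, hG, hR, hB]
   simp [show "uwgrb".toList = ['u','w','g','r','b'] from rfl, List.filter, classify,
      show String.ofList (PySem.Chars.upper ['u']) = "U" from by decide,
      show String.ofList (PySem.Chars.upper ['w']) = "W" from by decide,
      show String.ofList (PySem.Chars.upper ['g']) = "G" from by decide,
      show String.ofList (PySem.Chars.upper ['r']) = "R" from by decide,
      show String.ofList (PySem.Chars.upper ['b']) = "B" from by decide,
      hU, hW, hG, hR, hB])
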